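-- pv_equiv track=rewrite | github.com/yluo3421/Leetcode-Solutions | Python/3004-Drone/3004-Drone-Min-Energy.py | calc_drone_min_energy
-- ===== SOURCE A (Python) =====
-- def calc_drone_min_energy(route):
--   # your code goes here
--
--   start_energy = 0
--   for i in range(len(route) - 1, 0, -1):
--     height_diff = route[i][2] - route[i - 1][2]
--     if height_diff < 0:
--       if start_energy > 0:
--         start_energy += height_diff
--       # reset start energy to 0
--       if start_energy < 0:
--         start_energy = 0
--     elif height_diff > 0:
--       start_energy += height_diff
--   return start_energy
-- ===== SOURCE B (Python) =====
-- def calc_drone_min_energy(route):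
--   if not route:
--     return 0
--   return max(p[2] for p in route) - route[0][2]
-- ===== Notes on version B (the rewrite author's own statement) =====
-- stated objective: simpler
-- what changed: Replaces the reverse clamped-accumulation loop with the closed form max(heights) - first height (guarded by the empty-route case).
import Mathlib
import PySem

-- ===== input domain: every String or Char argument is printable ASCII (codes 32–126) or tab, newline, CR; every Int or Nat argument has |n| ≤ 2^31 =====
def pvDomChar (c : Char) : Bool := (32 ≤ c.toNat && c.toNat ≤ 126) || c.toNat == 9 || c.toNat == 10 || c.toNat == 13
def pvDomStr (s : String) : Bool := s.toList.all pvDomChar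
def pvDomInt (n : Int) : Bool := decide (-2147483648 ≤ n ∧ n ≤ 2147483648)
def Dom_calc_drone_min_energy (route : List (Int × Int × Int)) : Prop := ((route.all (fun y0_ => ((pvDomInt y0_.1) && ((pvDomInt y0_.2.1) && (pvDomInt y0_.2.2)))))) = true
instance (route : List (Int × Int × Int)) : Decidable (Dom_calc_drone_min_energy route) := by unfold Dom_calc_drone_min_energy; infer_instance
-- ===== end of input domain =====

-- B replaces A's reverse clamped-accumulation loop by the closed form
-- max(heights) - first height; objective: simpler.

-- ===== PORT A =====
-- loop body of A's 'for i in range(len(route)-1, 0, -1)' (kept as a named helper)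
def pvBodyA (route : List (Int × Int × Int)) (start_energy i : Int) : Int :=
  let height_diff :=
    (PySem.List.pyGetD route i ((0:Int),(0:Int),(0:Int))).2.2
      - (PySem.List.pyGetD route (i-1) ((0:Int),(0:Int),(0:Int))).2.2
  if height_diff < 0 then
    let s1 := if start_energy > 0 then start_energy + height_diff else start_energy
    if s1 < 0 then 0 else s1
  else if height_diff > 0 then start_energy + height_diff
  else start_energy

def calc_drone_min_energy (route : List (Int × Int × Int)) : Int :=
  (PySem.List.pyRange ((route.length : Int) - 1) 0 (-1)).foldl (pvBodyA route) 0

-- ===== PORT B =====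
def calc_drone_min_energy_alt (route : List (Int × Int × Int)) : Int :=
  match route with
  | [] => 0
  | p :: rest => rest.foldl (fun m q => max m q.2.2) p.2.2 - p.2.2

-- ===== PRECONDITION & SPEC =====
def Spec_calc_drone_min_energy (route : List (Int × Int × Int)) (out : Int) : Prop := out = calc_drone_min_energy_alt route
instance (route : List (Int × Int × Int)) (out : Int) : Decidable (Spec_calc_drone_min_energy route out) := by unfold Spec_calc_drone_min_energy; infer_instance

-- ===== CLAIM (what is proved, stated in full; the proofs are below) =====
def Claim_equal_calc_drone_min_energy : Prop := ∀ (route : List (Int × Int × Int)), Dom_calc_drone_min_energy route → Spec_calc_drone_min_energy route (calc_drone_min_energy route)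

-- ===== LEMMAS AND PROOFS =====

-- height at index j of the route
def pvH (route : List (Int × Int × Int)) (j : Nat) : Int :=
  (route.getD j ((0:Int),(0:Int),(0:Int))).2.2

-- running maximum of the first k+1 heights
def pvPM (route : List (Int × Int × Int)) : Nat → Int
  | 0 => pvH route 0
  | k+1 => max (pvPM route k) (pvH route (k+1))

lemma pvBodyA_step (route : List (Int × Int × Int)) (s : Int) (hs : 0 ≤ s)
    (j : Nat) (_hj : j + 1 < route.length) :
    pvBodyA route s ((j : Int) + 1) = max 0 (s + (pvH route (j+1) - pvH route j)) := by
  have e1 : ((j : Int) + 1) = ((j + 1 : Nat) : Int) := by push_cast; ring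
  have e2 : ((j : Int) + 1) - 1 = ((j : Nat) : Int) := by ring
  unfold pvBodyA pvH
  rw [e2]
  rw [e1]
  simp only [PySem.List.pyGetD_natCast]
  split_ifs <;> omega

lemma pvLoop (route : List (Int × Int × Int)) :
    ∀ (k : Nat) (s : Int), 0 ≤ s → k + 1 ≤ route.length → 1 ≤ k →
    (PySem.List.pyRange (k : Int) 0 (-1)).foldl (pvBodyA route) s
      = max (s + pvH route k) (pvPM route (k-1)) - pvH route 0 := by
  intro k
  induction k with
  | zero => intro s _ _ h1; omega
  | succ k ih =>
    intro s hs hlen _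
    have hpos : (0 : Int) < ((k + 1 : Nat) : Int) := by push_cast; omega
    rw [PySem.List.pyRange_neg_one_cons hpos]
    simp only [List.foldl_cons]
    have ecast : ((k + 1 : Nat) : Int) = (k : Int) + 1 := by push_cast; ring
    rw [ecast, pvBodyA_step route s hs k (by omega)]
    have ecast2 : ((k : Int) + 1) - 1 = (k : Int) := by ring
    rw [ecast2]
    cases k with
    | zero =>
      rw [PySem.List.pyRange_neg_one_eq_nil (by norm_num)]
      simp only [List.foldl_nil, pvPM]
      omega
    | succ m =>
      rw [ih _ (le_max_left _ _) (by omega) (by omega)]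
      have hpm : pvPM route (m+1) = max (pvPM route m) (pvH route (m+1)) := rfl
      have hpm2 : pvPM route (m+1+1-1) = max (pvPM route m) (pvH route (m+1)) := rfl
      simp only [Nat.add_sub_cancel] at *
      rw [hpm]
      omega

lemma pvAlt_foldl (p : Int × Int × Int) (tl : List (Int × Int × Int)) :
    ∀ (k : Nat), k ≤ tl.length →
    (tl.take k).foldl (fun m q => max m q.2.2) p.2.2 = pvPM (p :: tl) k := by
  intro k
  induction k with
  | zero => intro _; simp [pvPM, pvH]
  | succ k ih =>
    intro hk
    have hklt : k < tl.length := by omega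
    rw [List.take_add_one]
    simp only [List.getElem?_eq_getElem hklt, Option.toList_some, List.foldl_append,
      List.foldl_cons, List.foldl_nil]
    rw [ih (by omega)]
    have : pvH (p :: tl) (k+1) = tl[k].2.2 := by
      simp [pvH, List.getD_eq_getElem?_getD, List.getElem?_eq_getElem hklt]
    rw [pvPM, this]

-- ===== VERDICT (by name: the statement is the Claim_ definition above) =====
theorem calc_drone_min_energy_spec : Claim_equal_calc_drone_min_energy := by
  intro route _dom
  unfold Spec_calc_drone_min_energy
  match route with
  | [] =>
    simp [calc_drone_min_energy, calc_drone_min_energy_alt]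
  | [p] =>
    simp [calc_drone_min_energy, calc_drone_min_energy_alt]
  | p :: q :: rest =>
    have hlen : ((p :: q :: rest : List (Int × Int × Int)).length : Int) - 1
        = ((rest.length + 1 : Nat) : Int) := by
      simp
    have hA := pvLoop (p :: q :: rest) (rest.length + 1) 0 (le_refl 0)
      (by simp) (by omega)
    have hB := pvAlt_foldl p (q :: rest) (rest.length + 1) (by simp)
    rw [show rest.length + 1 = (q :: rest).length by simp, List.take_length] at hB
    simp only [calc_drone_min_energy, calc_drone_min_energy_alt]
    rw [hlen, hA]
    rw [show (q :: rest).length = rest.length + 1 from by simp] at hB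
    rw [hB]
    have h0 : pvH (p :: q :: rest) 0 = p.2.2 := rfl
    have hpm : pvPM (p :: q :: rest) (rest.length + 1)
        = max (pvPM (p :: q :: rest) rest.length)
              (pvH (p :: q :: rest) (rest.length + 1)) := rfl
    simp only [Nat.add_sub_cancel]
    rw [h0, hpm]
    omega
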